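-- pv_equiv track=rewrite | github.com/phibzy/InterviewQPractice | Solutions/CheckBinarySubstringOfSizeK/checkBinary.py | hasAllCodes
-- ===== SOURCE A (Python) =====
-- def hasAllCodes(s: str, k: int) -> bool:
--     # If k > s.length, then it obviously won't work
--     if k > len(s): return False
--
--     # Generate all substrings of size k in string
--     # BIG BRAIN MOMENT: since we know that we will have 2**K possible
--     # substrings, once the pass is done simply check if size of dict is 2**K
--     # Return True if it is, False if it isn't
--     substrings = dict()
--
--     i = 0
--     nextK = k
--     while len(substrings) != 2**k and nextK <= len(s):
--         # Get next substring
--         nextS = s[i:nextK]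
--         substrings.setdefault(nextS, 1)
--         i += 1
--         nextK += 1
--
--     # Check if we have the required number of unique substrings
--     return len(substrings) == 2**k
-- ===== SOURCE B (Python) =====
-- def hasAllCodes(s: str, k: int) -> bool:
--     # Rolling polynomial code of the current k-window (base = number of Unicode
--     # code points, so distinct windows always get distinct codes); counts the
--     # distinct codes instead of slicing and hashing a length-k substring per step.
--     if k < 0 or k > len(s):
--         return False
--     BASE = 0x110000
--     top = BASE ** (k - 1) if k > 0 else 0
--     h = 0
--     for c in s[:k]:
--         h = h * BASE + ord(c)
--     seen = {h}
--     for j in range(k, len(s)):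
--         h = (h - ord(s[j - k]) * top) * BASE + ord(s[j])
--         seen.add(h)
--     return len(seen) >= 2 ** k
-- ===== Notes on version B (the rewrite author's own statement) =====
-- stated objective: alternative
-- what changed: A slices a fresh k-character substring into a dict at every position with an early exit at 2^k entries; B instead maintains a rolling base-0x110000 polynomial code of the current window (O(1) big-int updates per step instead of slicing) and counts distinct codes in a set, which is exact because every character value is below the base.
-- intended difference: For k <= -1075, where Python's float 2**k underflows to exactly 0.0, A returns True for every string (len(dict) == 0.0 holds before the loop runs); B returns False, the intended answer since a negative code length cannot have all its codes present. — e.g. on hasAllCodes("", -1075): A returns true, B returns false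
import Mathlib
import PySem

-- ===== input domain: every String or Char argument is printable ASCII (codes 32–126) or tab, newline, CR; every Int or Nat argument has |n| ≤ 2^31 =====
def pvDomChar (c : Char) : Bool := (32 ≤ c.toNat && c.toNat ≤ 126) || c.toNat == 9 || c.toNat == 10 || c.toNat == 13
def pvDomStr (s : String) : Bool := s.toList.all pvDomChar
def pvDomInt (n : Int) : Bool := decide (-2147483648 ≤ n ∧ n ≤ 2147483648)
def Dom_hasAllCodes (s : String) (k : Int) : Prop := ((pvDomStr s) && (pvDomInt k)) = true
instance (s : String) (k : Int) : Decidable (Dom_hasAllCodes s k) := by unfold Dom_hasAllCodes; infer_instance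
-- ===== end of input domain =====

-- B replaces A's slice-into-a-dict loop with a rolling polynomial code of the current
-- k-window (base = number of Unicode code points, so distinct windows get distinct codes),
-- counting distinct codes in a set; A = B is proved outside D_ (k ≤ -1075, where Python's
-- float 2**k underflows to 0.0 and A returns True; B returns False, the intended value).

-- ===== PORT A =====
-- Python's `n == 2**k` for an int n = a dict length: for k < 0, `2**k` is a float; for
-- -1074 ≤ k < 0 it is strictly between 0 and 1, never equal to an int, and for k ≤ -1075
-- it underflows to exactly 0.0, so the comparison is `n == 0` there (checked against CPython).
def pvPowEqLen (n : Nat) (k : Int) : Bool :=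
  if 0 ≤ k then decide (n = 2 ^ k.toNat)
  else if k ≤ -1075 then decide (n = 0)
  else false

-- the while loop: state (substrings, i, nextK); condition `len(substrings) != 2**k and nextK <= len(s)`
def hasAllCodesLoop (s : String) (k : Int) (d : PySem.Dict String Int) (i nextK : Int) :
    PySem.Dict String Int :=
  if h : pvPowEqLen d.size k = false ∧ nextK ≤ PySem.Str.len s then
    hasAllCodesLoop s k (d.setdefault (PySem.Str.slice s (some i) (some nextK)) 1) (i + 1) (nextK + 1)
  else d
termination_by (PySem.Str.len s + 1 - nextK).toNat
decreasing_by
  have h2 := h.2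
  omega

def hasAllCodes (s : String) (k : Int) : Bool :=
  if PySem.Str.len s < k then false
  else pvPowEqLen (hasAllCodesLoop s k PySem.Dict.empty 0 k).size k

-- ===== PORT B =====
def pvB : Int := 1114112   -- 0x110000

-- the loop body: h = (h - ord(s[j-k])*top)*BASE + ord(s[j]); seen.add(h)
def pvAltStep (s : String) (k top : Int) (st : Int × PySem.Set Int) (j : Int) :
    Int × PySem.Set Int :=
  let h := (st.1 - ((PySem.List.pyGetD s.toList (j - k) ' ').toNat : Int) * top) * pvB
           + ((PySem.List.pyGetD s.toList j ' ').toNat : Int)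
  (h, PySem.Set.add st.2 h)

def hasAllCodes_alt (s : String) (k : Int) : Bool :=
  if k < 0 ∨ PySem.Str.len s < k then false
  else
    let top : Int := if 0 < k then pvB ^ (k - 1).toNat else 0
    -- h = 0; for c in s[:k]: h = h*BASE + ord(c)
    let h0 : Int := (PySem.Str.slice s none (some k)).toList.foldl
      (fun h c => h * pvB + (c.toNat : Int)) 0
    -- seen = {h}; for j in range(k, len(s)): step
    let fin := (PySem.List.pyRange k (PySem.Str.len s) 1).foldl
      (pvAltStep s k top) (h0, PySem.Set.ofList [h0])
    decide (2 ^ k.toNat ≤ fin.2.length)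

-- ===== PRECONDITION & SPEC =====
-- For k ≤ -1075 Python's float 2**k underflows to exactly 0.0, so A returns True for every
-- string (len(dict) == 0.0 holds before the loop runs); B returns False there, the intended
-- answer, since a negative code length can never have all 2^k codes present.
def D_hasAllCodes (s : String) (k : Int) : Prop := k ≤ -1075
instance (s : String) (k : Int) : Decidable (D_hasAllCodes s k) := by unfold D_hasAllCodes; infer_instance

def Spec_hasAllCodes (s : String) (k : Int) (out : Bool) : Prop := ¬ D_hasAllCodes s k → out = hasAllCodes_alt s k
instance (s : String) (k : Int) (out : Bool) : Decidable (Spec_hasAllCodes s k out) := by unfold Spec_hasAllCodes; infer_instance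

def pvDiffWitness_hasAllCodes : String × Int := ("", -1075)
def pvDiffWitnessOut_hasAllCodes : Bool × Bool := (true, false)

-- ===== CLAIM (what is proved, stated in full; the proofs are below) =====
def Claim_unchanged_hasAllCodes : Prop := ∀ (s : String) (k : Int), Dom_hasAllCodes s k → Spec_hasAllCodes s k (hasAllCodes s k)
def Claim_changed_hasAllCodes : Prop := Dom_hasAllCodes (pvDiffWitness_hasAllCodes.1) (pvDiffWitness_hasAllCodes.2) ∧ D_hasAllCodes (pvDiffWitness_hasAllCodes.1) (pvDiffWitness_hasAllCodes.2) ∧ hasAllCodes (pvDiffWitness_hasAllCodes.1) (pvDiffWitness_hasAllCodes.2) = pvDiffWitnessOut_hasAllCodes.1 ∧ hasAllCodes_alt (pvDiffWitness_hasAllCodes.1) (pvDiffWitness_hasAllCodes.2) = pvDiffWitnessOut_hasAllCodes.2 ∧ pvDiffWitnessOut_hasAllCodes.1 ≠ pvDiffWitnessOut_hasAllCodes.2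
def Claim_exact_hasAllCodes : Prop := ∀ (s : String) (k : Int), Dom_hasAllCodes s k → D_hasAllCodes s k → hasAllCodes s k ≠ hasAllCodes_alt s k

-- ===== LEMMAS AND PROOFS =====

-- the list of k-windows of s (for 0 ≤ k ≤ len s there are len s - k + 1 of them)
def pvWin (s : String) (k : Int) : List String :=
  (PySem.List.pyRange 0 (PySem.Str.len s - k + 1) 1).map
    (fun i => PySem.Str.slice s (some i) (some (i + k)))

-- the polynomial code of a char list, and of a window
def pvEnc (cs : List Char) : Int := cs.foldl (fun h c => h * pvB + (c.toNat : Int)) 0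
def pvEncS (w : String) : Int := pvEnc w.toList

lemma pvB_pos : (0 : Int) < pvB := by norm_num [pvB]

lemma pvChar_lt (c : Char) : c.toNat < 1114112 := by
  have h := c.valid
  unfold UInt32.isValidChar Nat.isValidChar at h
  have : c.toNat = c.val.toNat := rfl
  omega

lemma pvEnc_from (cs : List Char) (h : Int) :
    cs.foldl (fun h c => h * pvB + (c.toNat : Int)) h = h * pvB ^ cs.length + pvEnc cs := by
  induction cs generalizing h with
  | nil => simp [pvEnc]
  | cons c t ih =>
    simp only [List.foldl_cons, List.length_cons, pvEnc] at *
    rw [ih (h * pvB + c.toNat), ih (0 * pvB + c.toNat)]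
    ring

lemma pvEnc_cons (c : Char) (t : List Char) :
    pvEnc (c :: t) = (c.toNat : Int) * pvB ^ t.length + pvEnc t := by
  show (c :: t).foldl (fun h c => h * pvB + (c.toNat : Int)) 0 = _
  rw [List.foldl_cons, pvEnc_from]
  ring

lemma pvEnc_concat (t : List Char) (c : Char) :
    pvEnc (t ++ [c]) = pvEnc t * pvB + (c.toNat : Int) := by
  show (t ++ [c]).foldl (fun h c => h * pvB + (c.toNat : Int)) 0 = _
  rw [List.foldl_append]
  rfl

lemma pvEnc_bounds (cs : List Char) : 0 ≤ pvEnc cs ∧ pvEnc cs < pvB ^ cs.length := by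
  induction cs with
  | nil => simp [pvEnc, pvB]
  | cons c t ih =>
    rw [pvEnc_cons]
    have hpos : (0 : Int) < pvB ^ t.length := pow_pos pvB_pos _
    have hc : (c.toNat : Int) < pvB := by
      have := pvChar_lt c
      simp only [pvB]
      exact_mod_cast this
    constructor
    · have : (0 : Int) ≤ (c.toNat : Int) * pvB ^ t.length := by positivity
      omega
    · have h1 : (c.toNat : Int) * pvB ^ t.length ≤ (pvB - 1) * pvB ^ t.length := by
        apply mul_le_mul_of_nonneg_right _ (le_of_lt hpos)
        omega
      have h2 : pvB ^ (t.length + 1) = pvB * pvB ^ t.length := by ring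
      simp only [List.length_cons, h2]
      nlinarith [ih.1, ih.2]

lemma pvEnc_inj (cs ds : List Char) (hlen : cs.length = ds.length)
    (h : pvEnc cs = pvEnc ds) : cs = ds := by
  induction cs generalizing ds with
  | nil =>
    cases ds with
    | nil => rfl
    | cons d t => simp at hlen
  | cons c t ih =>
    cases ds with
    | nil => simp at hlen
    | cons d u =>
      have hlen' : t.length = u.length := by simpa using hlen
      rw [pvEnc_cons, pvEnc_cons, hlen'] at h
      have hbt := pvEnc_bounds t
      have hbu := pvEnc_bounds u
      rw [hlen'] at hbt
      have hpos : (0 : Int) < pvB ^ u.length := pow_pos pvB_pos _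
      have hcd : (c.toNat : Int) = (d.toNat : Int) := by
        by_contra hne
        rcases lt_or_gt_of_ne hne with hlt | hlt
        · nlinarith [hbt.1, hbt.2, hbu.1, hbu.2, (by omega : (c.toNat : Int) + 1 ≤ (d.toNat : Int))]
        · nlinarith [hbt.1, hbt.2, hbu.1, hbu.2, (by omega : (d.toNat : Int) + 1 ≤ (c.toNat : Int))]
      have hcd' : c = d := by
        apply Char.ext
        apply UInt32.toNat_inj.mp
        exact_mod_cast hcd
      subst hcd'
      have : pvEnc t = pvEnc u := by omega
      rw [ih u hlen' this]

lemma pvEncS_inj (w v : String) (hlen : w.toList.length = v.toList.length)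
    (h : pvEncS w = pvEncS v) : w = v :=
  String.toList_inj.mp (pvEnc_inj _ _ hlen h)

-- length of a set of images under a function injective on the list
lemma pvSet_ofList_map {α β : Type} [BEq α] [LawfulBEq α] [BEq β] [LawfulBEq β]
    (l : List α) (f : α → β)
    (hinj : ∀ x ∈ l, ∀ y ∈ l, f x = f y → x = y) :
    PySem.Set.ofList (l.map f) = (PySem.Set.ofList l).map f := by
  induction l using List.reverseRecOn with
  | nil => rfl
  | append_singleton t x ih =>
    have hinj' : ∀ a ∈ t, ∀ b ∈ t, f a = f b → a = b := by
      intro a ha b hb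
      exact hinj a (by simp [ha]) b (by simp [hb])
    rw [List.map_append, List.map_singleton, PySem.Set.ofList_append_singleton,
        PySem.Set.ofList_append_singleton, ih hinj',
        PySem.Set.add_eq_ite, PySem.Set.add_eq_ite]
    have hmem : f x ∈ (PySem.Set.ofList t).map f ↔ x ∈ PySem.Set.ofList t := by
      constructor
      · intro hm
        rcases List.mem_map.mp hm with ⟨y, hy, hxy⟩
        have hyt : y ∈ t := (PySem.Set.mem_ofList t y).mp hy
        have : y = x := hinj y (by simp [hyt]) x (by simp) hxy
        exact this ▸ hy
      · intro hm
        exact List.mem_map.mpr ⟨x, hm, rfl⟩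
    by_cases hx : x ∈ PySem.Set.ofList t
    · rw [if_pos (hmem.mpr hx), if_pos hx]
    · rw [if_neg (fun hc => hx (hmem.mp hc)), if_neg hx, List.map_append, List.map_singleton]

lemma pvSet_map_length {α β : Type} [BEq α] [LawfulBEq α] [BEq β] [LawfulBEq β]
    (l : List α) (f : α → β)
    (hinj : ∀ x ∈ l, ∀ y ∈ l, f x = f y → x = y) :
    (PySem.Set.ofList (l.map f)).length = (PySem.Set.ofList l).length := by
  rw [pvSet_ofList_map l f hinj, List.length_map]

-- window t of cs, as a char list
def pvWinL (cs : List Char) (K t : Nat) : List Char := (cs.drop t).take K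

lemma pvStrLen (s : String) : PySem.Str.len s = (s.toList.length : Int) := by
  simp [PySem.Str.len]

lemma pvWin_length (s : String) (K : Nat) (hK : K ≤ s.toList.length) :
    (pvWin s (K : Int)).length = s.toList.length - K + 1 := by
  rw [pvWin, pvStrLen]
  simp only [List.length_map, PySem.List.length_pyRange_one]
  omega

lemma pvWin_getElem (s : String) (K t : Nat) (h : t < (pvWin s (K : Int)).length) :
    (pvWin s (K : Int))[t].toList = pvWinL s.toList K t := by
  simp only [pvWin, List.getElem_map, PySem.List.getElem_pyRange_one]
  rw [PySem.Str.toList_slice]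
  simp only [PySem.Chars.slice_eq_listSlice]
  have : (0 : Int) + (t : Int) = ((t : Nat) : Int) := by omega
  rw [this, PySem.List.slice_natCast_add]
  rfl

lemma pvWinL_length (cs : List Char) (K t : Nat) (h : t + K ≤ cs.length) :
    (pvWinL cs K t).length = K := by
  simp [pvWinL]
  omega

-- every window is a length-K string
lemma pvWin_mem_length (s : String) (K : Nat) (hK : K ≤ s.toList.length)
    (w : String) (hw : w ∈ pvWin s (K : Int)) : w.toList.length = K := by
  rcases List.mem_iff_getElem.mp hw with ⟨t, ht, hval⟩
  rw [← hval, pvWin_getElem s K t ht]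
  apply pvWinL_length
  rw [pvWin_length s K hK] at ht
  omega

-- enc is injective on the windows
lemma pvWin_enc_inj (s : String) (K : Nat) (hK : K ≤ s.toList.length) :
    ∀ x ∈ pvWin s (K : Int), ∀ y ∈ pvWin s (K : Int), pvEncS x = pvEncS y → x = y := by
  intro x hx y hy hxy
  exact pvEncS_inj x y
    ((pvWin_mem_length s K hK x hx).trans (pvWin_mem_length s K hK y hy).symm) hxy

-- Set cardinality grows by at most one under add, never shrinks
lemma pvSet_add_length_le {α : Type} [BEq α] [LawfulBEq α] (s : PySem.Set α) (x : α) :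
    (PySem.Set.add s x).length ≤ s.length + 1 := by
  rw [PySem.Set.add_eq_ite]; split <;> simp
lemma pvSet_le_add_length {α : Type} [BEq α] [LawfulBEq α] (s : PySem.Set α) (x : α) :
    s.length ≤ (PySem.Set.add s x).length := by
  rw [PySem.Set.add_eq_ite]; split <;> simp

lemma pvSet_le_update_length {α : Type} [BEq α] [LawfulBEq α] (l : List α) (s : PySem.Set α) :
    s.length ≤ (PySem.Set.update s l).length := by
  induction l generalizing s with
  | nil => simp [PySem.Set.update_nil]
  | cons x xs ih =>
    rw [PySem.Set.update_cons]
    exact le_trans (pvSet_le_add_length s x) (ih _)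

lemma pvSet_take_length_le {α : Type} [BEq α] [LawfulBEq α] (xs : List α) (j : Nat) :
    (PySem.Set.ofList (xs.take j)).length ≤ (PySem.Set.ofList xs).length := by
  conv_rhs => rw [← List.take_append_drop j xs]
  rw [PySem.Set.ofList_append]
  exact pvSet_le_update_length _ _

-- a dict's size is the number of its keys
lemma pvDict_size_keys {κ ν : Type} [BEq κ] (d : PySem.Dict κ ν) :
    d.size = d.keys.length := by
  simp [PySem.Dict.size, PySem.Dict.keys]

-- setdefault's effect on the keys is Set.add
lemma pvKeys_setdefault {ν : Type} (d : PySem.Dict String ν) (w : String) (v : ν) :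
    (d.setdefault w v).keys = PySem.Set.add d.keys w := by
  rw [PySem.Dict.keys_setdefault, PySem.Set.add_eq_ite]
  by_cases hc : d.contains w = true
  · rw [if_pos hc, if_pos ((PySem.Dict.contains_iff_mem_keys d w).mp hc)]
  · rw [if_neg hc, if_neg (fun hm => hc ((PySem.Dict.contains_iff_mem_keys d w).mpr hm))]

-- A's loop, once it exits: the verdict equals "2^K distinct windows exist"
lemma pvA_exit (s : String) (K : Nat) (hK : K ≤ s.toList.length)
    (d : PySem.Dict String Int) (j : Nat)
    (hkeys : d.keys = PySem.Set.ofList ((pvWin s (K : Int)).take j))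
    (hsz : d.size ≤ 2 ^ K)
    (hdone : d.size = 2 ^ K ∨ (pvWin s (K : Int)).length ≤ j) :
    pvPowEqLen d.size (K : Int) = decide (2 ^ K ≤ (PySem.Set.ofList (pvWin s (K : Int))).length) := by
  have hsd : d.size = (PySem.Set.ofList ((pvWin s (K : Int)).take j)).length := by
    rw [pvDict_size_keys, hkeys]
  rcases hdone with hstop | hend
  · have h2 : 2 ^ K ≤ (PySem.Set.ofList (pvWin s (K : Int))).length := by
      calc 2 ^ K = d.size := hstop.symm
        _ = _ := hsd
        _ ≤ _ := pvSet_take_length_le _ j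
    simp [pvPowEqLen, hstop, h2, Int.toNat_natCast]
  · rw [List.take_of_length_le hend] at hsd
    by_cases hstop : d.size = 2 ^ K
    · simp [pvPowEqLen, hstop, hsd ▸ hstop.symm.le, Int.toNat_natCast]
    · have : ¬ (2 ^ K ≤ (PySem.Set.ofList (pvWin s (K : Int))).length) := by omega
      simp [pvPowEqLen, hstop, this, Int.toNat_natCast]

-- A's loop invariant: started anywhere consistent, the loop computes the same verdict
lemma pvA_loop (s : String) (K : Nat) (hK : (K : Int) ≤ PySem.Str.len s) :
    ∀ (m j : Nat) (d : PySem.Dict String Int),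
      s.toList.length + 1 ≤ m + j + K →
      d.keys = PySem.Set.ofList ((pvWin s (K : Int)).take j) →
      d.size ≤ 2 ^ K →
      pvPowEqLen (hasAllCodesLoop s (K : Int) d (j : Int) ((j : Int) + (K : Int))).size (K : Int)
        = decide (2 ^ K ≤ (PySem.Set.ofList (pvWin s (K : Int))).length) := by
  have hKn : K ≤ s.toList.length := by rw [pvStrLen] at hK; exact_mod_cast hK
  intro m
  induction m with
  | zero =>
    intro j d hm hkeys hsz
    have hend : (pvWin s (K : Int)).length ≤ j := by
      rw [pvWin_length s K hKn]; omega
    rw [hasAllCodesLoop, dif_neg]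
    · exact pvA_exit s K hKn d j hkeys hsz (Or.inr hend)
    · rintro ⟨-, hle⟩
      rw [pvStrLen] at hle
      have : (j : Int) + (K : Int) ≤ (s.toList.length : Int) := hle
      omega
  | succ m ih =>
    intro j d hm hkeys hsz
    by_cases hstop : d.size = 2 ^ K
    · rw [hasAllCodesLoop, dif_neg]
      · exact pvA_exit s K hKn d j hkeys hsz (Or.inl hstop)
      · rintro ⟨hf, -⟩
        simp [pvPowEqLen, hstop, Int.toNat_natCast] at hf
    · have hcond : pvPowEqLen d.size (K : Int) = false := by
        simp [pvPowEqLen, hstop, Int.toNat_natCast]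
      by_cases hle : (j : Int) + (K : Int) ≤ PySem.Str.len s
      · have hjK : j + K ≤ s.toList.length := by
          rw [pvStrLen] at hle; exact_mod_cast hle
        have hjlt : j < (pvWin s (K : Int)).length := by
          rw [pvWin_length s K hKn]; omega
        rw [hasAllCodesLoop, dif_pos ⟨hcond, hle⟩]
        have harg : (pvWin s (K : Int))[j] = PySem.Str.slice s (some (j : Int)) (some ((j : Int) + (K : Int))) := by
          simp [pvWin, PySem.List.getElem_pyRange_one]
        have hkeys' : (d.setdefault (PySem.Str.slice s (some (j : Int)) (some ((j : Int) + (K : Int)))) 1).keys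
            = PySem.Set.ofList ((pvWin s (K : Int)).take (j + 1)) := by
          rw [pvKeys_setdefault, hkeys, List.take_succ_eq_append_getElem hjlt,
              PySem.Set.ofList_append_singleton, harg]
        have hsz' : (d.setdefault (PySem.Str.slice s (some (j : Int)) (some ((j : Int) + (K : Int)))) 1).size ≤ 2 ^ K := by
          rw [pvDict_size_keys, hkeys']
          rw [List.take_succ_eq_append_getElem hjlt, PySem.Set.ofList_append_singleton]
          have h1 := pvSet_add_length_le (PySem.Set.ofList ((pvWin s (K : Int)).take j)) ((pvWin s (K : Int))[j])
          have h2 : (PySem.Set.ofList ((pvWin s (K : Int)).take j)).length = d.size := by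
            rw [pvDict_size_keys, hkeys]
          omega
        have := ih (j + 1) (d.setdefault (PySem.Str.slice s (some (j : Int)) (some ((j : Int) + (K : Int)))) 1)
          (by omega) hkeys' hsz'
        have hcast1 : ((j : Int) + 1) = (((j + 1 : Nat)) : Int) := by push_cast; ring
        have hcast2 : ((j : Int) + (K : Int) + 1) = (((j + 1 : Nat)) : Int) + (K : Int) := by push_cast; ring
        rw [hcast1, hcast2]
        exact this
      · have hend : (pvWin s (K : Int)).length ≤ j := by
          rw [pvStrLen] at hle
          rw [pvWin_length s K hKn]
          omega
        rw [hasAllCodesLoop, dif_neg]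
        · exact pvA_exit s K hKn d j hkeys hsz (Or.inr hend)
        · rintro ⟨-, h2⟩; exact hle h2

-- A's characterization
lemma pvA_char (s : String) (K : Nat) (hK : (K : Int) ≤ PySem.Str.len s) :
    hasAllCodes s (K : Int) = decide (2 ^ K ≤ (PySem.Set.ofList (pvWin s (K : Int))).length) := by
  have hKn : K ≤ s.toList.length := by
    rw [pvStrLen] at hK; exact_mod_cast hK
  rw [hasAllCodes, if_neg (by omega)]
  have h2 : (PySem.Dict.empty : PySem.Dict String Int).keys
      = PySem.Set.ofList ((pvWin s (K : Int)).take 0) := rfl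
  have h3 : (PySem.Dict.empty : PySem.Dict String Int).size ≤ 2 ^ K := by
    simp [PySem.Dict.empty, PySem.Dict.size]
  have := pvA_loop s K hK (s.toList.length + 1) 0 PySem.Dict.empty (by omega) h2 h3
  simpa only [Nat.cast_zero, zero_add] using this

-- the rolling-code identity: the code of window t+1 from the code of window t
lemma pvRoll (cs : List Char) (K t : Nat) (hK : 1 ≤ K) (h : t + K + 1 ≤ cs.length) :
    pvEnc (pvWinL cs K (t+1))
      = (pvEnc (pvWinL cs K t) - ((cs[t]'(by omega)).toNat : Int) * pvB ^ (K - 1)) * pvB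
        + ((cs[t + K]'(by omega)).toNat : Int) := by
  obtain ⟨K', rfl⟩ : ∃ K', K = K' + 1 := ⟨K - 1, by omega⟩
  have ht : t < cs.length := by omega
  simp only [Nat.add_sub_cancel]
  have h1 : pvWinL cs (K' + 1) t = cs[t] :: (cs.drop (t+1)).take K' := by
    rw [pvWinL, List.drop_eq_getElem_cons ht, List.take_succ_cons]
  have hKd : K' < (cs.drop (t+1)).length := by
    rw [List.length_drop]; omega
  have h2 : pvWinL cs (K' + 1) (t+1) = (cs.drop (t+1)).take K' ++ [cs[t + (K' + 1)]'(by omega)] := by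
    rw [pvWinL, List.take_succ_eq_append_getElem hKd]
    congr 1
    rw [List.getElem_drop]
    apply List.singleton_inj.mpr
    exact getElem_congr rfl (by omega) _
  have hu : ((cs.drop (t+1)).take K').length = K' := by
    rw [List.length_take, List.length_drop]; omega
  rw [h1, h2, pvEnc_cons, pvEnc_concat, hu]
  ring

-- B's loop invariant: after consuming range(K, K+t) the state is (code of window t, codes of windows 0..t)
lemma pvB_loop (s : String) (K : Nat) (hK1 : 1 ≤ K) :
    ∀ t : Nat, t + K ≤ s.toList.length →
      (PySem.List.pyRange (K : Int) ((K : Int) + (t : Int)) 1).foldl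
          (pvAltStep s (K : Int) (pvB ^ (K - 1)))
          (pvEnc (pvWinL s.toList K 0), PySem.Set.ofList [pvEnc (pvWinL s.toList K 0)])
        = (pvEnc (pvWinL s.toList K t),
           PySem.Set.ofList ((List.range (t+1)).map (fun i => pvEnc (pvWinL s.toList K i)))) := by
  intro t
  induction t with
  | zero =>
    intro _
    rw [show ((K : Int) + ((0 : Nat) : Int)) = (K : Int) by push_cast; ring,
        PySem.List.pyRange_one_eq_nil (le_refl _)]
    simp
  | succ t ih =>
    intro hlen
    have ht : t + K ≤ s.toList.length := by omega
    rw [show ((K : Int) + ((t + 1 : Nat) : Int)) = ((K : Int) + (t : Int)) + 1 by push_cast; ring,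
        PySem.List.pyRange_one_succ_right (by omega), List.foldl_append, ih ht]
    simp only [List.foldl_cons, List.foldl_nil]
    have hgd1 : PySem.List.pyGetD s.toList ((K : Int) + (t : Int) - (K : Int)) ' '
        = s.toList[t]'(by omega) := by
      rw [show ((K : Int) + (t : Int) - (K : Int)) = ((t : Nat) : Int) by ring,
          PySem.List.pyGetD_natCast, List.getD_eq_getElem _ _ (by omega)]
    have hgd2 : PySem.List.pyGetD s.toList ((K : Int) + (t : Int)) ' '
        = s.toList[t + K]'(by omega) := by
      rw [show ((K : Int) + (t : Int)) = ((t + K : Nat) : Int) by push_cast; ring,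
          PySem.List.pyGetD_natCast, List.getD_eq_getElem _ _ (by omega)]
    rw [pvAltStep, hgd1, hgd2]
    have hroll := pvRoll s.toList K t hK1 (by omega)
    simp only [← hroll]
    conv_rhs => rw [show t + 1 + 1 = (t + 1) + 1 from rfl, List.range_succ, List.map_append,
        List.map_singleton, PySem.Set.ofList_append_singleton]

-- seen never shrinks (used for the K = 0 case)
lemma pvSeen_mono (s : String) (k top : Int) (l : List Int) (st : Int × PySem.Set Int) :
    st.2.length ≤ ((l.foldl (pvAltStep s k top) st).2).length := by
  induction l generalizing st with
  | nil => simp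
  | cons x xs ih =>
    rw [List.foldl_cons]
    refine le_trans ?_ (ih _)
    simp only [pvAltStep]
    rw [PySem.Set.add_eq_ite]
    split <;> simp

lemma pvSet_ofList_ne_nil {α : Type} [BEq α] [LawfulBEq α] (x : α) (t : List α) :
    1 ≤ (PySem.Set.ofList (x :: t)).length := by
  rw [PySem.Set.ofList_cons]
  simp

-- B's characterization for K ≥ 1
lemma pvB_char (s : String) (K : Nat) (hK1 : 1 ≤ K) (hK : (K : Int) ≤ PySem.Str.len s) :
    hasAllCodes_alt s (K : Int)
      = decide (2 ^ K ≤ (PySem.Set.ofList ((pvWin s (K : Int)).map pvEncS)).length) := by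
  have hKn : K ≤ s.toList.length := by rw [pvStrLen] at hK; exact_mod_cast hK
  rw [hasAllCodes_alt, if_neg (by push_neg; constructor <;> omega)]
  have htop : (if (0 : Int) < (K : Int) then pvB ^ (((K : Int)) - 1).toNat else 0)
      = pvB ^ (K - 1) := by
    rw [if_pos (by exact_mod_cast hK1)]
    congr 1
    omega
  have hh0 : (PySem.Str.slice s none (some (K : Int))).toList.foldl
      (fun h c => h * pvB + (c.toNat : Int)) 0 = pvEnc (pvWinL s.toList K 0) := by
    rw [PySem.Str.toList_slice, PySem.Chars.slice_eq_listSlice, PySem.List.slice_to_natCast]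
    simp [pvEnc, pvWinL]
  have hlen : PySem.Str.len s = (K : Int) + ((s.toList.length - K : Nat) : Int) := by
    rw [pvStrLen]; push_cast; omega
  simp only [htop, hh0, hlen]
  rw [pvB_loop s K hK1 (s.toList.length - K) (by omega)]
  have hmap : (pvWin s (K : Int)).map pvEncS
      = (List.range (s.toList.length - K + 1)).map (fun i => pvEnc (pvWinL s.toList K i)) := by
    apply List.ext_getElem
    · rw [List.length_map, List.length_map, List.length_range, pvWin_length s K hKn]
    · intro i h1 h2
      rw [List.getElem_map, List.getElem_map, List.getElem_range]
      rw [List.length_map] at h1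
      rw [pvEncS, pvWin_getElem s K i h1]
  rw [hmap, Int.toNat_natCast]

-- B is true for K = 0
lemma pvB_zero (s : String) (h : (0 : Int) ≤ PySem.Str.len s) :
    hasAllCodes_alt s 0 = true := by
  rw [hasAllCodes_alt, if_neg (by push_neg; omega)]
  simp only []
  rw [decide_eq_true_iff]
  refine le_trans ?_ (pvSeen_mono s 0 _ _ _)
  simp [PySem.Set.ofList_cons]

-- A is true for K = 0 as well
lemma pvWin_ofList_pos (s : String) (K : Nat) (hK : K ≤ s.toList.length) :
    1 ≤ (PySem.Set.ofList (pvWin s (K : Int))).length := by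
  have hlen := pvWin_length s K hK
  cases hW : pvWin s (K : Int) with
  | nil => rw [hW] at hlen; simp at hlen
  | cons x t => exact pvSet_ofList_ne_nil x t

-- A returns true whenever k ≤ -1075 (the loop never runs: len(dict) == 0.0 already holds)
lemma pvA_underflow (s : String) (k : Int) (hk : k ≤ -1075) : hasAllCodes s k = true := by
  have hlen : (0 : Int) ≤ PySem.Str.len s := by rw [pvStrLen]; positivity
  rw [hasAllCodes, if_neg (by omega), hasAllCodesLoop, dif_neg]
  · simp only [pvPowEqLen, PySem.Dict.empty, PySem.Dict.size]
    rw [if_neg (by omega), if_pos hk]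
    simp
  · rintro ⟨hf, -⟩
    simp only [pvPowEqLen, PySem.Dict.empty, PySem.Dict.size] at hf
    rw [if_neg (by omega), if_pos hk] at hf
    simp at hf

-- ===== VERDICT (by name: the statement is the Claim_ definition above) =====
theorem hasAllCodes_spec : Claim_unchanged_hasAllCodes := by
  intro s k _
  unfold Spec_hasAllCodes
  intro hD
  unfold D_hasAllCodes at hD
  by_cases hneg : k < 0
  · rw [hasAllCodes_alt, if_pos (Or.inl hneg), hasAllCodes]
    split_ifs with h
    · rfl
    · simp only [pvPowEqLen]
      rw [if_neg (by omega), if_neg (by omega)]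
  · by_cases hbig : PySem.Str.len s < k
    · rw [hasAllCodes_alt, if_pos (Or.inr hbig), hasAllCodes, if_pos hbig]
    · push_neg at hneg hbig
      lift k to Nat using hneg with K
      have hKn : K ≤ s.toList.length := by rw [pvStrLen] at hbig; exact_mod_cast hbig
      by_cases hK0 : K = 0
      · subst hK0
        simp only [Nat.cast_zero] at hbig ⊢
        rw [pvB_zero s (by rw [pvStrLen]; positivity)]
        have hA := pvA_char s 0 hbig
        simp only [Nat.cast_zero] at hA
        rw [hA, decide_eq_true_iff, pow_zero]
        have := pvWin_ofList_pos s 0 (Nat.zero_le _)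
        simpa using this
      · rw [pvA_char s K hbig, pvB_char s K (by omega) hbig,
            pvSet_map_length (pvWin s (K : Int)) pvEncS (pvWin_enc_inj s K hKn)]

theorem hasAllCodes_changed : Claim_changed_hasAllCodes := by
  unfold Claim_changed_hasAllCodes
  refine ⟨by decide, by decide, ?_, by decide, by decide⟩
  exact pvA_underflow "" (-1075) (by decide)

theorem hasAllCodes_tight : Claim_exact_hasAllCodes := by
  intro s k _ hD
  unfold D_hasAllCodes at hD
  rw [pvA_underflow s k hD, hasAllCodes_alt, if_pos (Or.inl (by omega))]
  simp
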